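-- pv_equiv track=rewrite | github.com/shoom1/agentic-cli | src/agentic_cli/tools/_core/tasks.py | format_task_checklist
-- ===== SOURCE A (Python) =====
-- from typing import Any
--
-- _STATUS_ICONS = {
--     "completed": "[✓]",
--     "in_progress": "[▸]",
--     "pending": "[ ]",
--     "cancelled": "[-]",
-- }
--
-- _STATUS_ORDER = {
--     "in_progress": 0,
--     "pending": 1,
--     "cancelled": 2,
--     "completed": 3,
-- }
--
-- def format_task_checklist(tasks: list[dict[str, Any]]) -> str:
--     """Format task dicts as a compact checklist with status icons."""
--     if not tasks:
--         return ""
--     sorted_tasks = sorted(tasks, key=lambda t: _STATUS_ORDER.get(t.get("status", "pending"), 1))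
--     lines = []
--     for t in sorted_tasks:
--         icon = _STATUS_ICONS.get(t.get("status", "pending"), "[ ]")
--         lines.append(f"{icon} {t['description']}")
--     return "\n".join(lines)
-- ===== SOURCE B (Python) =====
-- _STATUS_ICONS = {
--     "completed": "[✓]",
--     "in_progress": "[▸]",
--     "pending": "[ ]",
--     "cancelled": "[-]",
-- }
--
-- _STATUS_ORDER = {
--     "in_progress": 0,
--     "pending": 1,
--     "cancelled": 2,
--     "completed": 3,
-- }
--
-- def format_task_checklist(tasks: list) -> str:
--     """Single-pass bucket sort by status order instead of calling sorted."""
--     if not tasks: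
--         return ""
--     buckets = [[], [], [], []]
--     for t in tasks:
--         k = _STATUS_ORDER.get(t.get("status", "pending"), 1)
--         buckets[k].append(t)
--     lines = []
--     for bucket in buckets:
--         for t in bucket:
--             icon = _STATUS_ICONS.get(t.get("status", "pending"), "[ ]")
--             lines.append(f"{icon} {t['description']}")
--     return "\n".join(lines)
-- ===== Notes on version B (the rewrite author's own statement) =====
-- stated objective: alternative
-- what changed: Replaces the comparison sort with a single-pass four-way bucket partition by status rank (stable by construction) and formats the concatenated buckets.
import Mathlib
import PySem

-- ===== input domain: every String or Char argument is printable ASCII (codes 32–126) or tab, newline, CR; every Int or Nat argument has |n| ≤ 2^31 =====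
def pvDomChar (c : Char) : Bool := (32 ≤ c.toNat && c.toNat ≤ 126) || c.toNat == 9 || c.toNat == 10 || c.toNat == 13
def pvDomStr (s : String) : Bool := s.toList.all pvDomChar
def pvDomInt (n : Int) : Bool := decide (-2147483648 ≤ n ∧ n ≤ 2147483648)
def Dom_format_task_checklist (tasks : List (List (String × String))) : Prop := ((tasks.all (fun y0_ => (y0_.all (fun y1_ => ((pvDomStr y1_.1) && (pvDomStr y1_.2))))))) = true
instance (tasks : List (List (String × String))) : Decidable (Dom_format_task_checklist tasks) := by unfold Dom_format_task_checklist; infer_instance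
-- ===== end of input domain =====

-- B replaces the comparison sort with a single-pass four-way bucket partition by status rank (alternative decomposition, stable by construction).

-- ===== PORT A =====
def pvStatusIcons : PySem.Dict String String :=
  ⟨[("completed", "[✓]"), ("in_progress", "[▸]"), ("pending", "[ ]"), ("cancelled", "[-]")]⟩

def pvStatusOrder : PySem.Dict String Int :=
  ⟨[("in_progress", 0), ("pending", 1), ("cancelled", 2), ("completed", 3)]⟩

-- key of the sort: _STATUS_ORDER.get(t.get("status", "pending"), 1)
def pvKeyA (t : List (String × String)) : Int :=
  PySem.Dict.getD pvStatusOrder (PySem.Dict.getD ⟨t⟩ "status" "pending") 1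

-- one line of the loop body: f"{icon} {t['description']}" (Pre_ guarantees 'description' is present, so getD reads the real value)
def pvLineA (t : List (String × String)) : String :=
  PySem.Dict.getD pvStatusIcons (PySem.Dict.getD ⟨t⟩ "status" "pending") "[ ]" ++ " " ++
    PySem.Dict.getD ⟨t⟩ "description" ""

def format_task_checklist (tasks : List (List (String × String))) : String :=
  if tasks = [] then ""
  else
    let sorted_tasks := PySem.List.sorted tasks pvKeyA
    let lines := sorted_tasks.foldl (fun acc t => acc ++ [pvLineA t]) []
    PySem.Str.join "\n" lines

-- ===== PORT B =====
def pvKeyB (t : List (String × String)) : Int :=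
  PySem.Dict.getD pvStatusOrder (PySem.Dict.getD ⟨t⟩ "status" "pending") 1

def pvLineB (t : List (String × String)) : String :=
  PySem.Dict.getD pvStatusIcons (PySem.Dict.getD ⟨t⟩ "status" "pending") "[ ]" ++ " " ++
    PySem.Dict.getD ⟨t⟩ "description" ""

-- buckets[k].append(t), one pass over tasks
def pvBuckets (tasks : List (List (String × String))) :
    List (List (String × String)) × List (List (String × String)) ×
    List (List (String × String)) × List (List (String × String)) :=
  tasks.foldl
    (fun b t =>
      let k := pvKeyB t
      if k = 0 then (b.1 ++ [t], b.2.1, b.2.2.1, b.2.2.2)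
      else if k = 1 then (b.1, b.2.1 ++ [t], b.2.2.1, b.2.2.2)
      else if k = 2 then (b.1, b.2.1, b.2.2.1 ++ [t], b.2.2.2)
      else (b.1, b.2.1, b.2.2.1, b.2.2.2 ++ [t]))
    ([], [], [], [])

def format_task_checklist_alt (tasks : List (List (String × String))) : String :=
  if tasks = [] then ""
  else
    let b := pvBuckets tasks
    let lines := (b.1 ++ b.2.1 ++ b.2.2.1 ++ b.2.2.2).foldl (fun acc t => acc ++ [pvLineB t]) []
    PySem.Str.join "\n" lines

-- ===== PRECONDITION & SPEC =====
-- Pre_ excludes exactly the inputs where the Python A raises KeyError: a task without a "description" key.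
def Pre_format_task_checklist (tasks : List (List (String × String))) : Prop :=
  ∀ t ∈ tasks, (PySem.Dict.get? (⟨t⟩ : PySem.Dict String String) "description").isSome = true
instance (tasks : List (List (String × String))) : Decidable (Pre_format_task_checklist tasks) := by unfold Pre_format_task_checklist; infer_instance

def pvWitness_format_task_checklist : (List (List (String × String))) :=
  [[("description", "write docs"), ("status", "completed")], [("description", "fix bug")]]

def Spec_format_task_checklist (tasks : List (List (String × String))) (out : String) : Prop := out = format_task_checklist_alt tasks
instance (tasks : List (List (String × String))) (out : String) : Decidable (Spec_format_task_checklist tasks out) := by unfold Spec_format_task_checklist; infer_instance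

-- ===== CLAIM (what is proved, stated in full; the proofs are below) =====
def Claim_equal_format_task_checklist : Prop := ∀ (tasks : List (List (String × String))), Dom_format_task_checklist tasks → Pre_format_task_checklist tasks → Spec_format_task_checklist tasks (format_task_checklist tasks)

-- ===== LEMMAS AND PROOFS =====

-- the rank dictionary only yields 0..3 (default included)
theorem pvOrder_range (s : String) :
    PySem.Dict.getD pvStatusOrder s 1 = 0 ∨ PySem.Dict.getD pvStatusOrder s 1 = 1 ∨
    PySem.Dict.getD pvStatusOrder s 1 = 2 ∨ PySem.Dict.getD pvStatusOrder s 1 = 3 := by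
  by_cases h1 : ("in_progress" : String) == s
  · simp [pvStatusOrder, PySem.Dict.getD, PySem.Dict.get?, List.find?, h1]
  · by_cases h2 : ("pending" : String) == s
    · simp [pvStatusOrder, PySem.Dict.getD, PySem.Dict.get?, List.find?, h1, h2]
    · by_cases h3 : ("cancelled" : String) == s
      · simp [pvStatusOrder, PySem.Dict.getD, PySem.Dict.get?, List.find?, h1, h2, h3]
      · by_cases h4 : ("completed" : String) == s
        · simp [pvStatusOrder, PySem.Dict.getD, PySem.Dict.get?, List.find?, h1, h2, h3, h4]
        · simp [pvStatusOrder, PySem.Dict.getD, PySem.Dict.get?, List.find?, h1, h2, h3, h4]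

theorem pvKeyA_range (t : List (String × String)) :
    pvKeyA t = 0 ∨ pvKeyA t = 1 ∨ pvKeyA t = 2 ∨ pvKeyA t = 3 :=
  pvOrder_range _

theorem pvKeyB_range (t : List (String × String)) :
    pvKeyB t = 0 ∨ pvKeyB t = 1 ∨ pvKeyB t = 2 ∨ pvKeyB t = 3 :=
  pvOrder_range _

theorem pv_mem_snoc {a : Type} {y x : a} {L : List a} (h : y ∈ L ++ [x]) : y ∈ L ∨ y = x := by
  simpa using h

-- insertBy places x after a block it does not go before and before a block it goes before
theorem pv_insertBy_mid {a : Type} (before : a → a → Bool) (x : a) (l r : List a)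
    (hl : ∀ y ∈ l, before x y = false) (hr : ∀ y ∈ r, before x y = true) :
    PySem.List.insertBy before x (l ++ r) = l ++ x :: r := by
  induction l with
  | nil =>
    cases r with
    | nil => simp [PySem.List.insertBy]
    | cons z zs => simp [PySem.List.insertBy, hr z (by simp)]
  | cons a as ih =>
    have ha : before x a = false := hl a (by simp)
    simp only [List.cons_append, PySem.List.insertBy, ha, Bool.false_eq_true, if_false,
      List.cons.injEq, true_and]
    exact ih (fun y hy => hl y (by simp [hy]))

-- the stable-sort fold over tasks maintains the four key-buckets, concatenated
theorem pv_sort_loop (xs : List (List (String × String)))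
    (A B C D : List (List (String × String)))
    (hA : ∀ y ∈ A, pvKeyA y = 0) (hB : ∀ y ∈ B, pvKeyA y = 1)
    (hC : ∀ y ∈ C, pvKeyA y = 2) (hD : ∀ y ∈ D, pvKeyA y = 3) :
    xs.foldl (fun acc x => PySem.List.insertBy (fun a b => decide (pvKeyA a < pvKeyA b)) x acc)
      (A ++ B ++ C ++ D)
    = (A ++ xs.filter (fun t => pvKeyA t = 0)) ++ (B ++ xs.filter (fun t => pvKeyA t = 1))
      ++ (C ++ xs.filter (fun t => pvKeyA t = 2)) ++ (D ++ xs.filter (fun t => pvKeyA t = 3)) := by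
  induction xs generalizing A B C D with
  | nil => simp
  | cons x xs ih =>
    rcases pvKeyA_range x with hx | hx | hx | hx
    · have step : PySem.List.insertBy (fun a b => decide (pvKeyA a < pvKeyA b)) x (A ++ B ++ C ++ D)
          = (A ++ [x]) ++ B ++ C ++ D := by
        have hl : ∀ y ∈ A, (decide (pvKeyA x < pvKeyA y)) = false := by
          intro y hy; simp [hx, hA y hy]
        have hr : ∀ y ∈ B ++ C ++ D, (decide (pvKeyA x < pvKeyA y)) = true := by
          intro y hy
          rcases List.mem_append.1 hy with hy1 | hy1
          · rcases List.mem_append.1 hy1 with hy2 | hy2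
            · simp [hx, hB y hy2]
            · simp [hx, hC y hy2]
          · simp [hx, hD y hy1]
        have := pv_insertBy_mid (fun a b => decide (pvKeyA a < pvKeyA b)) x A (B ++ C ++ D) hl hr
        simp only [List.append_assoc] at this ⊢
        simpa using this
      have hA' : ∀ y ∈ A ++ [x], pvKeyA y = 0 := by
        intro y hy
        rcases pv_mem_snoc hy with h | h
        · exact hA y h
        · rw [h]; exact hx
      rw [List.foldl_cons, step, ih (A ++ [x]) B C D hA' hB hC hD]
      simp [hx]
    · have step : PySem.List.insertBy (fun a b => decide (pvKeyA a < pvKeyA b)) x (A ++ B ++ C ++ D)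
          = A ++ (B ++ [x]) ++ C ++ D := by
        have hl : ∀ y ∈ A ++ B, (decide (pvKeyA x < pvKeyA y)) = false := by
          intro y hy
          rcases List.mem_append.1 hy with hy1 | hy1
          · simp [hx, hA y hy1]
          · simp [hx, hB y hy1]
        have hr : ∀ y ∈ C ++ D, (decide (pvKeyA x < pvKeyA y)) = true := by
          intro y hy
          rcases List.mem_append.1 hy with hy1 | hy1
          · simp [hx, hC y hy1]
          · simp [hx, hD y hy1]
        have := pv_insertBy_mid (fun a b => decide (pvKeyA a < pvKeyA b)) x (A ++ B) (C ++ D) hl hr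
        simp only [List.append_assoc] at this ⊢
        simpa using this
      have hB' : ∀ y ∈ B ++ [x], pvKeyA y = 1 := by
        intro y hy
        rcases pv_mem_snoc hy with h | h
        · exact hB y h
        · rw [h]; exact hx
      rw [List.foldl_cons, step, ih A (B ++ [x]) C D hA hB' hC hD]
      simp [hx]
    · have step : PySem.List.insertBy (fun a b => decide (pvKeyA a < pvKeyA b)) x (A ++ B ++ C ++ D)
          = A ++ B ++ (C ++ [x]) ++ D := by
        have hl : ∀ y ∈ A ++ B ++ C, (decide (pvKeyA x < pvKeyA y)) = false := by
          intro y hy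
          rcases List.mem_append.1 hy with hy1 | hy1
          · rcases List.mem_append.1 hy1 with hy2 | hy2
            · simp [hx, hA y hy2]
            · simp [hx, hB y hy2]
          · simp [hx, hC y hy1]
        have hr : ∀ y ∈ D, (decide (pvKeyA x < pvKeyA y)) = true := by
          intro y hy; simp [hx, hD y hy]
        have := pv_insertBy_mid (fun a b => decide (pvKeyA a < pvKeyA b)) x (A ++ B ++ C) D hl hr
        simp only [List.append_assoc] at this ⊢
        simpa using this
      have hC' : ∀ y ∈ C ++ [x], pvKeyA y = 2 := by
        intro y hy
        rcases pv_mem_snoc hy with h | h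
        · exact hC y h
        · rw [h]; exact hx
      rw [List.foldl_cons, step, ih A B (C ++ [x]) D hA hB hC' hD]
      simp [hx]
    · have step : PySem.List.insertBy (fun a b => decide (pvKeyA a < pvKeyA b)) x (A ++ B ++ C ++ D)
          = A ++ B ++ C ++ (D ++ [x]) := by
        have hl : ∀ y ∈ A ++ B ++ C ++ D, (decide (pvKeyA x < pvKeyA y)) = false := by
          intro y hy
          rcases List.mem_append.1 hy with hy1 | hy1
          · rcases List.mem_append.1 hy1 with hy2 | hy2
            · rcases List.mem_append.1 hy2 with hy3 | hy3
              · simp [hx, hA y hy3]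
              · simp [hx, hB y hy3]
            · simp [hx, hC y hy2]
          · simp [hx, hD y hy1]
        have := PySem.List.insertBy_of_forall_not_before
          (fun a b => decide (pvKeyA a < pvKeyA b)) x (A ++ B ++ C ++ D) hl
        simp only [List.append_assoc] at this ⊢
        simpa using this
      have hD' : ∀ y ∈ D ++ [x], pvKeyA y = 3 := by
        intro y hy
        rcases pv_mem_snoc hy with h | h
        · exact hD y h
        · rw [h]; exact hx
      rw [List.foldl_cons, step, ih A B C (D ++ [x]) hA hB hC hD']
      simp [hx]

-- A's stable sort IS the concatenation of the four key-filters
theorem pv_sorted_eq_filters (tasks : List (List (String × String))) :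
    PySem.List.sorted tasks pvKeyA
      = tasks.filter (fun t => pvKeyA t = 0) ++ tasks.filter (fun t => pvKeyA t = 1)
        ++ tasks.filter (fun t => pvKeyA t = 2) ++ tasks.filter (fun t => pvKeyA t = 3) := by
  have := pv_sort_loop tasks [] [] [] [] (by simp) (by simp) (by simp) (by simp)
  simpa [PySem.List.sorted_eq_foldl_insertBy] using this

-- B's bucket fold computes the four key-filters
theorem pv_buckets_eq_filters (tasks : List (List (String × String))) :
    pvBuckets tasks
      = (tasks.filter (fun t => pvKeyB t = 0), tasks.filter (fun t => pvKeyB t = 1),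
         tasks.filter (fun t => pvKeyB t = 2), tasks.filter (fun t => pvKeyB t = 3)) := by
  unfold pvBuckets
  have loop : ∀ (xs : List (List (String × String)))
      (A B C D : List (List (String × String))),
      xs.foldl
        (fun b t =>
          let k := pvKeyB t
          if k = 0 then (b.1 ++ [t], b.2.1, b.2.2.1, b.2.2.2)
          else if k = 1 then (b.1, b.2.1 ++ [t], b.2.2.1, b.2.2.2)
          else if k = 2 then (b.1, b.2.1, b.2.2.1 ++ [t], b.2.2.2)
          else (b.1, b.2.1, b.2.2.1, b.2.2.2 ++ [t]))
        (A, B, C, D)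
      = (A ++ xs.filter (fun t => pvKeyB t = 0), B ++ xs.filter (fun t => pvKeyB t = 1),
         C ++ xs.filter (fun t => pvKeyB t = 2), D ++ xs.filter (fun t => pvKeyB t = 3)) := by
    intro xs
    induction xs with
    | nil => intro A B C D; simp
    | cons x xs ih =>
      intro A B C D
      rcases pvKeyB_range x with hx | hx | hx | hx
      · simp only [List.foldl_cons, ih, List.filter_cons]
        simp [hx]
      · simp only [List.foldl_cons, ih, List.filter_cons]
        simp [hx]
      · simp only [List.foldl_cons, ih, List.filter_cons]
        simp [hx]
      · simp only [List.foldl_cons, ih, List.filter_cons]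
        simp [hx]
  simpa using loop tasks [] [] [] []

-- ===== VERDICT (by name: the statement is the Claim_ definition above) =====
theorem format_task_checklist_spec : Claim_equal_format_task_checklist := by
  intro tasks _ _
  unfold Spec_format_task_checklist format_task_checklist format_task_checklist_alt
  by_cases h : tasks = []
  · simp [h]
  · rw [if_neg h, if_neg h]
    rw [pv_sorted_eq_filters, pv_buckets_eq_filters]
    rfl
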